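-- pv_equiv track=rewrite | github.com/StrategicMilk/Vetinari-Orchestrastor | vetinari/tools/git_tool.py | _common_directory
-- ===== SOURCE A (Python) =====
-- def _common_directory(files: list[str]) -> str:
--     """Find the common directory prefix shared by all *files*.
--
--     Args:
--         files: List of file paths.
--
--     Returns:
--         The common directory path string, or an empty string when there is
--         no shared prefix.
--     """
--     if not files:
--         return ""
--     parts = [f.split("/") for f in files]
--     common: list[str] = []
--     for segments in zip(*parts):
--         if len(set(segments)) == 1:
--             common.append(segments[0])
--         else:
--             break
--     return "/".join(common)
-- ===== SOURCE B (Python) =====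
-- def _common_directory(files: list[str]) -> str:
--     """Find the common directory prefix shared by all *files*.
--
--     Maintains a running prefix (segment list of the first file) and narrows
--     it against each remaining file, instead of transposing columns.
--     """
--     if not files:
--         return ""
--     prefix = files[0].split("/")
--     for f in files[1:]:
--         segs = f.split("/")
--         k = 0
--         while k < len(prefix) and k < len(segs) and prefix[k] == segs[k]:
--             k += 1
--         prefix = prefix[:k]
--         if not prefix:
--             break
--     return "/".join(prefix)
-- ===== Notes on version B (the rewrite author's own statement) =====
-- stated objective: alternative
-- what changed: Replaces the transpose (zip(*parts)) plus column-wise set-based all-equal scan with a single row-by-row pass that narrows a maintained prefix list against each file, breaking early once the prefix is empty.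
import Mathlib
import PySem

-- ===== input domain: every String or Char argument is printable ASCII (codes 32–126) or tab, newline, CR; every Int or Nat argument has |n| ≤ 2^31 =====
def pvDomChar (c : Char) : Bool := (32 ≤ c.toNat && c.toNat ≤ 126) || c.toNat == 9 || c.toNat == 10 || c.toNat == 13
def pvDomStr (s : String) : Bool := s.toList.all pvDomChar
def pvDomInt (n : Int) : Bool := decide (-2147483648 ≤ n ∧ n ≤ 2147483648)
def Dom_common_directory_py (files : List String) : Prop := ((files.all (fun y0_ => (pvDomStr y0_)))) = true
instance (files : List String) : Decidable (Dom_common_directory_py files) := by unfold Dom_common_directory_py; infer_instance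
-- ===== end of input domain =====

-- B narrows a maintained prefix list file-by-file instead of transposing with zip and scanning columns; return values agree on all inputs.


-- ===== PORT A =====
-- f.split("/"): sep is the nonempty literal "/", so split? always returns some
def pvSplit (f : String) : List String := (PySem.Str.split? f "/").getD []

-- termination of the zip loop: all rows nonempty, so total length drops
theorem pvZipT_dec (parts : List (List String)) (h1 : parts ≠ [])
    (h2 : (parts.all fun l => !l.isEmpty) = true) :
    (List.map List.length (List.map List.tail parts)).sum < (List.map List.length parts).sum := by
  cases parts with
  | nil => exact absurd rfl h1
  | cons p ps =>
    simp only [List.all_cons, Bool.and_eq_true] at h2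
    cases p with
    | nil => simp at h2
    | cons a p' =>
      simp only [List.map_cons, List.sum_cons, List.map_map]
      have hle : ((ps.map (List.length ∘ List.tail)).sum) ≤ (ps.map List.length).sum := by
        apply List.sum_le_sum
        intro q _
        cases q <;> simp
      simp only [List.tail_cons, List.length_cons]
      omega

-- zip(*parts): emit the column of heads while every list still has an element
def pvZipT (parts : List (List String)) : List (List String) :=
  if parts ≠ [] ∧ parts.all (fun l => !l.isEmpty) then
    (parts.map (fun l => l.headD "")) :: pvZipT (parts.map List.tail)
  else []
termination_by (parts.map List.length).sum
decreasing_by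
  rename_i h
  simp only [List.map_attach_eq_pmap, List.pmap_eq_map]
  exact pvZipT_dec parts h.1 h.2

-- the 'for segments in zip(*parts)' loop with its break
def pvGoA : List (List String) → List String
  | [] => []
  | col :: rest =>
    if PySem.Set.len (PySem.Set.ofList col) == 1 then col.headD "" :: pvGoA rest
    else []

def common_directory_py (files : List String) : String :=
  if files = [] then ""
  else PySem.Str.join "/" (pvGoA (pvZipT (files.map pvSplit)))

-- ===== PORT B =====
-- the while loop: length of the longest common leading run of segments
def pvRunLen : List String → List String → Nat
  | a :: as, b :: bs => if a = b then pvRunLen as bs + 1 else 0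
  | _, _ => 0

-- the 'for f in files[1:]' loop with its break
def pvGoB : List String → List String → List String
  | pre, [] => pre
  | pre, f :: rest =>
    let p := pre.take (pvRunLen pre (pvSplit f))
    if p.isEmpty then p else pvGoB p rest

def common_directory_py_alt (files : List String) : String :=
  match files with
  | [] => ""
  | f :: rest => PySem.Str.join "/" (pvGoB (pvSplit f) rest)

-- ===== PRECONDITION & SPEC =====
def Spec_common_directory_py (files : List String) (out : String) : Prop := out = common_directory_py_alt files
instance (files : List String) (out : String) : Decidable (Spec_common_directory_py files out) := by unfold Spec_common_directory_py; infer_instance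

-- ===== CLAIM (what is proved, stated in full; the proofs are below) =====
def Claim_equal_common_directory_py : Prop := ∀ (files : List String), Dom_common_directory_py files → Spec_common_directory_py files (common_directory_py files)

-- ===== LEMMAS AND PROOFS =====

-- one narrowing step of B
def pvStep (acc q : List String) : List String := acc.take (pvRunLen acc q)

theorem pvStep_nil (q : List String) : pvStep [] q = [] := by
  simp [pvStep]

theorem pvFoldl_nil (qs : List (List String)) : qs.foldl pvStep [] = [] := by
  induction qs with
  | nil => rfl
  | cons q r ih => rw [List.foldl_cons, pvStep_nil, ih]

theorem pvGoB_eq_foldl (rest : List String) (pre : List String) :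
    pvGoB pre rest = (rest.map pvSplit).foldl pvStep pre := by
  induction rest generalizing pre with
  | nil => rfl
  | cons f r ih =>
    simp only [pvGoB, List.map_cons, List.foldl_cons]
    by_cases h : (pre.take (pvRunLen pre (pvSplit f))).isEmpty
    · rw [if_pos h]
      rw [List.isEmpty_iff] at h
      have hst : pvStep pre (pvSplit f) = [] := h
      rw [h, hst, pvFoldl_nil]
    · rw [if_neg h]
      exact ih _

theorem pvStep_prefix (acc q : List String) : pvStep acc q <+: acc := List.take_prefix _ _

theorem pvFoldl_prefix (qs : List (List String)) (acc : List String) :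
    qs.foldl pvStep acc <+: acc := by
  induction qs generalizing acc with
  | nil => exact List.prefix_refl _
  | cons q r ih => exact (ih _).trans (pvStep_prefix acc q)

-- set-size-1 characterisation of the column test
theorem pvLen_foldl_add_mono (l : List String) (s : List String) :
    s.length ≤ (l.foldl PySem.Set.add s).length := by
  induction l generalizing s with
  | nil => exact le_refl _
  | cons x r ih =>
    refine le_trans ?_ (ih (PySem.Set.add s x))
    simp only [PySem.Set.add]
    split <;> simp

theorem pvLen_foldl_add_eq (l : List String) (s : List String) :
    (l.foldl PySem.Set.add s).length = s.length ↔ ∀ x ∈ l, x ∈ s := by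
  induction l generalizing s with
  | nil => simp
  | cons x r ih =>
    simp only [List.foldl_cons, List.mem_cons]
    by_cases hx : x ∈ s
    · rw [show PySem.Set.add s x = s by simp [PySem.Set.add, hx]]
      rw [ih]
      constructor
      · intro h y hy
        rcases hy with rfl | hy
        · exact hx
        · exact h y hy
      · intro h y hy; exact h y (Or.inr hy)
    · rw [show PySem.Set.add s x = s ++ [x] by simp [PySem.Set.add, hx]]
      constructor
      · intro h
        have := pvLen_foldl_add_mono r (s ++ [x])
        rw [h, List.length_append] at this
        simp at this
      · intro h; exact absurd (h x (Or.inl rfl)) hx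

theorem pvColTest (a : String) (l : List String) :
    (PySem.Set.len (PySem.Set.ofList (a :: l)) == 1) = true ↔ ∀ x ∈ l, x = a := by
  have h0 : PySem.Set.add ([] : List String) a = [a] := by simp [PySem.Set.add]
  have h2 : PySem.Set.ofList (a :: l) = l.foldl PySem.Set.add [a] := by
    simp only [PySem.Set.ofList, PySem.Set.empty, List.foldl_cons, h0]
  rw [show PySem.Set.len (PySem.Set.ofList (a :: l))
        = ((l.foldl PySem.Set.add [a]).length : Int) by rw [h2]; rfl]
  constructor
  · intro h x hx
    have hlen : (l.foldl PySem.Set.add [a]).length = 1 := by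
      have := of_decide_eq_true (by simpa using h)
      exact_mod_cast this
    have := (pvLen_foldl_add_eq l [a]).mp (by simpa using hlen)
    simpa using this x hx
  · intro h
    have hlen : (l.foldl PySem.Set.add [a]).length = ([a] : List String).length :=
      (pvLen_foldl_add_eq l [a]).mpr (by intro x hx; simp [h x hx])
    simp at hlen
    simp [hlen]

theorem pvStep_cons (a : String) (p q : List String) :
    pvStep (a :: p) (a :: q) = a :: pvStep p q := by
  simp [pvStep, pvRunLen]

-- folding rows that all start with a: the head survives and the tails fold
theorem pvFold_cons (a : String) (qs : List (List String))
    (hq : ∀ q ∈ qs, ∃ q', q = a :: q') (p' : List String) :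
    List.foldl pvStep (a :: p') qs = a :: List.foldl pvStep p' (qs.map List.tail) := by
  induction qs generalizing p' with
  | nil => rfl
  | cons q r ihq =>
    obtain ⟨q', rfl⟩ := hq q (by simp)
    simp only [List.map_cons, List.foldl_cons, List.tail_cons, pvStep_cons]
    exact ihq (fun q2 hq2 => hq q2 (by simp [hq2])) (pvStep p' q')

-- main bridge: column scan over the transpose = row-by-row narrowing fold
theorem pvMain (p : List String) (qs : List (List String)) :
    pvGoA (pvZipT (p :: qs)) = qs.foldl pvStep p := by
  induction hn : ((p :: qs).map List.length).sum using Nat.strong_induction_on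
    generalizing p qs with
  | _ n ih =>
  subst hn
  rw [pvZipT]
  by_cases hall : (p :: qs).all (fun l => !l.isEmpty)
  · have hp : p ≠ [] := by
      simp only [List.all_cons, Bool.and_eq_true] at hall
      cases p <;> simp_all
    obtain ⟨a, p', rfl⟩ := List.exists_cons_of_ne_nil hp
    rw [if_pos ⟨by simp, hall⟩]
    simp only [List.map_cons, List.headD_cons, List.tail_cons]
    by_cases hset : (PySem.Set.len (PySem.Set.ofList
        (a :: qs.map (fun l => l.headD ""))) == 1) = true
    · -- all heads equal a
      have hheads : ∀ x ∈ qs.map (fun l => l.headD ""), x = a := (pvColTest _ _).mp hset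
      have hq : ∀ q ∈ qs, ∃ q', q = a :: q' := by
        intro q hq
        simp only [List.all_cons, Bool.and_eq_true, List.all_eq_true] at hall
        have hne : q ≠ [] := by
          have := hall.2 q hq; cases q <;> simp_all
        obtain ⟨b, q', rfl⟩ := List.exists_cons_of_ne_nil hne
        have hb : b = a := hheads b (by simp only [List.mem_map]; exact ⟨b :: q', hq, rfl⟩)
        exact ⟨q', by rw [hb]⟩
      simp only [pvGoA, if_pos hset]
      have hdec : ((p' :: qs.map List.tail).map List.length).sum <
          (((a :: p') :: qs).map List.length).sum := by
        simp only [List.map_cons, List.sum_cons, List.map_map, List.length_cons]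
        have hle : ((qs.map (List.length ∘ List.tail)).sum) ≤ (qs.map List.length).sum := by
          apply List.sum_le_sum
          intro q _
          cases q <;> simp
        omega
      rw [ih _ hdec p' (qs.map List.tail) rfl]
      exact (pvFold_cons a qs hq p').symm
    · -- some head differs from a: both sides collapse to []
      simp only [pvGoA, if_neg hset]
      have hex : ∃ q ∈ qs, q.headD "" ≠ a := by
        by_contra hc
        push Not at hc
        exact hset ((pvColTest _ _).mpr (by
          intro x hx
          simp only [List.mem_map] at hx
          obtain ⟨q0, hq0, rfl⟩ := hx
          exact hc q0 hq0))
      obtain ⟨q0, hq0, hne⟩ := hex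
      obtain ⟨l, r, rfl⟩ := List.append_of_mem hq0
      rw [List.foldl_append, List.foldl_cons]
      have hz : pvStep (l.foldl pvStep (a :: p')) q0 = [] := by
        have hpre := pvFoldl_prefix l (a :: p')
        cases hacc : l.foldl pvStep (a :: p') with
        | nil => exact pvStep_nil q0
        | cons b acc' =>
          rw [hacc] at hpre
          have hb : b = a := by
            rcases hpre with ⟨t, ht⟩
            simp only [List.cons_append, List.cons.injEq] at ht
            exact ht.1
          subst hb
          have hq0ne : q0 ≠ [] := by
            simp only [List.all_cons, Bool.and_eq_true, List.all_eq_true] at hall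
            have := hall.2 q0 (by simp)
            cases q0 <;> simp_all
          obtain ⟨c, q0', rfl⟩ := List.exists_cons_of_ne_nil hq0ne
          have hc : c ≠ b := by simpa using hne
          have hr0 : pvRunLen (b :: acc') (c :: q0') = 0 := by
            simp only [pvRunLen, if_neg (Ne.symm hc)]
          simp [pvStep, hr0]
      rw [hz, pvFoldl_nil]
  · -- some row already empty: zip stops immediately; the fold also collapses
    rw [if_neg (by simp only [ne_eq, reduceCtorEq, not_false_eq_true, true_and]; exact hall)]
    by_cases hp : p = []
    · subst hp; simp only [pvGoA]; exact (pvFoldl_nil qs).symm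
    · have hex : ∃ q ∈ qs, q = [] := by
        by_contra hc
        push Not at hc
        refine hall ?_
        simp only [List.all_cons, Bool.and_eq_true, List.all_eq_true]
        exact ⟨by cases p <;> simp_all, fun q hq => by
          have := hc q hq; cases q <;> simp_all⟩
      obtain ⟨q0, hq0, rfl⟩ := hex
      obtain ⟨l, r, rfl⟩ := List.append_of_mem hq0
      simp only [pvGoA]
      rw [List.foldl_append, List.foldl_cons]
      have hz : pvStep (l.foldl pvStep p) [] = [] := by
        cases l.foldl pvStep p with
        | nil => exact pvStep_nil []
        | cons b acc' => simp [pvStep, pvRunLen]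
      rw [hz, pvFoldl_nil]

-- ===== VERDICT (by name: the statement is the Claim_ definition above) =====
theorem common_directory_py_spec : Claim_equal_common_directory_py := by
  intro files _
  unfold Spec_common_directory_py common_directory_py common_directory_py_alt
  cases files with
  | nil => rfl
  | cons f rest =>
    rw [if_neg (by simp)]
    simp only [List.map_cons]
    rw [pvMain, pvGoB_eq_foldl]
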